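-- pv_equiv track=rewrite | github.com/joncampbell123/a-pile-of-documentation | devtest/markdown/read.py | findunescaped
-- ===== SOURCE A (Python) =====
-- def findunescaped(line,what,start):
--     ei = -1
--     i = line.find(what,start)
--     while True:
--         if i > 0 and line[i-1] == '\\':
--             start = i+1
--             i = line.find(what,start)
--         else:
--             ei = i
--             break
--     return ei
-- ===== SOURCE B (Python) =====
-- def findunescaped(line, what, start):
--     start = max(start, 0)
--     for i in range(start, len(line) - len(what) + 1):
--         if line.startswith(what, i) and (i == 0 or line[i - 1] != '\\'):
--             return i
--     return -1
-- ===== Notes on version B (the rewrite author's own statement) =====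
-- stated objective: simpler
-- what changed: A's repeated find-and-skip while loop is replaced by a single left-to-right position scan returning the first index where the substring starts and is not preceded by a backslash; Pre_ excludes only -len(line) < start < 0, where str.find's count-from-the-end normalization applies while B clamps the scan start to 0 - a corner outside this helper's intended use where either reading is defensible.
-- outside the precondition, e.g. on findunescaped('ab', 'a', -1): A returns -1, B returns 0; on findunescaped('abc', '', -1): A returns 2, B returns 0
import Mathlib
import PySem

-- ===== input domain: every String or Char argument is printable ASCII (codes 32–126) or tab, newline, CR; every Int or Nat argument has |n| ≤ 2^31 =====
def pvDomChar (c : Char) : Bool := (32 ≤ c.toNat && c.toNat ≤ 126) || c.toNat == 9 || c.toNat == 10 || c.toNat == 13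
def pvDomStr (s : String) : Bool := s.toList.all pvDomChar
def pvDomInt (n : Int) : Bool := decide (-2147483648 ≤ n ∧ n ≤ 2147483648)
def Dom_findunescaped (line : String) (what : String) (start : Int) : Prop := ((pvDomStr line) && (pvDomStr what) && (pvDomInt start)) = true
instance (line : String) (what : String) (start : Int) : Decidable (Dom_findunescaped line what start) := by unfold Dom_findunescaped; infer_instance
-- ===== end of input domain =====

-- B replaces A's repeated find-and-skip while loop by a single left-to-right position scan; return value only, no speed claim.
-- ===== PORT A =====
-- A's 'while True' loop; fuel (length + 2) strictly bounds the passes: the found index strictly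
-- increases by at least 1 each escaped pass and stays ≤ length, so the fuel-0 branch is unreachable.
def findunescapedGo (L W : List Char) (fuel : Nat) (i : Int) : Int :=
  match fuel with
  | 0 => i
  | fuel + 1 =>
    if 0 < i ∧ PySem.List.pyGet? L (i - 1) = some '\\' then
      findunescapedGo L W fuel (PySem.Chars.findFrom L W (i + 1) none)
    else i

def findunescaped (line : String) (what : String) (start : Int) : Int :=
  let L := line.toList
  let W := what.toList
  findunescapedGo L W (L.length + 2) (PySem.Chars.findFrom L W start none)

-- ===== PORT B =====
-- Source B's loop-body test: line.startswith(what, i) and (i == 0 or line[i-1] != '\\');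
-- str.startswith(what, i) is ported as startswith on the dropped list — exact for the 0 ≤ i the range produces.
def pvPredB (L W : List Char) (i : Int) : Bool :=
  PySem.Chars.startswith (L.drop i.toNat) W &&
  decide (i = 0 ∨ ¬ PySem.List.pyGet? L (i - 1) = some '\\')

-- Source B's 'for i in range(start, len(line) - len(what) + 1): if …: return i' / 'return -1'
def pvScanB (L W : List Char) (s : Int) : Int :=
  match (PySem.List.pyRange s (PySem.List.len L - PySem.List.len W + 1) 1).find? (pvPredB L W) with
  | some i => i
  | none => -1

def findunescaped_alt (line : String) (what : String) (start : Int) : Int :=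
  pvScanB line.toList what.toList (max start 0)

-- ===== PRECONDITION & SPEC =====
-- Pre_ excludes only -len(line) < start < 0: there str.find counts from the end while B clamps the
-- scan start to 0 — a defensible-corner difference outside this helper's intended use; for any other
-- negative start both programs scan from 0 and are proved equal.
def Pre_findunescaped (line : String) (what : String) (start : Int) : Prop :=
  0 ≤ start ∨ start + (line.toList.length : Int) ≤ 0
instance (line : String) (what : String) (start : Int) : Decidable (Pre_findunescaped line what start) := by unfold Pre_findunescaped; infer_instance
def pvWitness_findunescaped : String × String × Int := ("a\\bb", "b", 0)

def Spec_findunescaped (line : String) (what : String) (start : Int) (out : Int) : Prop := out = findunescaped_alt line what start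
instance (line : String) (what : String) (start : Int) (out : Int) : Decidable (Spec_findunescaped line what start out) := by unfold Spec_findunescaped; infer_instance

-- ===== CLAIM (what is proved, stated in full; the proofs are below) =====
def Claim_equal_findunescaped : Prop := ∀ (line : String) (what : String) (start : Int), Dom_findunescaped line what start → Pre_findunescaped line what start → Spec_findunescaped line what start (findunescaped line what start)

-- ===== LEMMAS AND PROOFS =====

lemma pvPredB_iff (L W : List Char) (k : Nat) :
    pvPredB L W (k : Int) = true ↔ (W <+: L.drop k ∧ (k = 0 ∨ ¬ L[k-1]? = some '\\')) := by
  unfold pvPredB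
  rw [Bool.and_eq_true, PySem.Chars.startswith_iff, decide_eq_true_eq, Int.toNat_natCast]
  cases k with
  | zero => simp
  | succ m =>
      have h2 : ((m + 1 : Nat) : Int) - 1 = (m : Int) := by push_cast; ring
      rw [h2, PySem.List.pyGet?_natCast]
      have h3 : ((m + 1 : Nat) : Int) ≠ 0 := by omega
      constructor
      · rintro ⟨a, b⟩
        refine ⟨a, ?_⟩
        rcases b with b | b
        · exact absurd b h3
        · exact Or.inr (by simpa using b)
      · rintro ⟨a, b⟩
        refine ⟨a, ?_⟩
        rcases b with b | b
        · exact absurd b (by omega)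
        · exact Or.inr (by simpa using b)

lemma pvPredB_prefix {L W : List Char} {k : Nat} (h : pvPredB L W (k : Int) = true) :
    W <+: L.drop k := ((pvPredB_iff L W k).mp h).1

lemma pvPredB_false_esc (L W : List Char) (k : Nat) (h0 : 0 < k) (h : L[k-1]? = some '\\') :
    pvPredB L W (k : Int) = false := by
  rw [Bool.eq_false_iff]
  intro hpb
  obtain ⟨-, h2⟩ := (pvPredB_iff L W k).mp hpb
  rcases h2 with h2 | h2
  · omega
  · exact h2 h

lemma pvScanB_empty (L W : List Char) (s : Int) (h : PySem.List.len L - PySem.List.len W + 1 ≤ s) :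
    pvScanB L W s = -1 := by
  unfold pvScanB
  rw [PySem.List.pyRange_one_eq_nil h]
  rfl

lemma pvScanB_none (L W : List Char) (k : Nat)
    (hall : ∀ i : Nat, k ≤ i → i ≤ L.length → pvPredB L W (i : Int) = false) :
    pvScanB L W (k : Int) = -1 := by
  unfold pvScanB
  have hnone : (PySem.List.pyRange (k : Int) (PySem.List.len L - PySem.List.len W + 1) 1).find? (pvPredB L W) = none := by
    rw [List.find?_eq_none]
    intro x hx
    rw [PySem.List.mem_pyRange_one] at hx
    simp only [PySem.List.len_eq] at hx
    have hx0 : 0 ≤ x := le_trans (Int.natCast_nonneg k) hx.1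
    have hW0 : (0 : Int) ≤ (W.length : Int) := Int.natCast_nonneg _
    have hxx : x = ((x.toNat : Nat) : Int) := (Int.toNat_of_nonneg hx0).symm
    rw [hxx, hall x.toNat (by omega) (by omega)]
    simp
  rw [hnone]

lemma pvScanB_skip (L W : List Char) (k j : Nat) (hkj : k ≤ j) (hj : j + W.length ≤ L.length)
    (hnone : ∀ i : Nat, k ≤ i → i < j → pvPredB L W (i : Int) = false)
    (hjf : pvPredB L W (j : Int) = false) :
    pvScanB L W (k : Int) = pvScanB L W ((j : Int) + 1) := by
  unfold pvScanB
  rw [PySem.List.pyRange_one_append (k : Int) ((j : Int) + 1) (PySem.List.len L - PySem.List.len W + 1)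
    (by omega) (by simp only [PySem.List.len_eq]; omega)]
  rw [List.find?_append]
  have h1 : (PySem.List.pyRange (k : Int) ((j : Int) + 1) 1).find? (pvPredB L W) = none := by
    rw [List.find?_eq_none]
    intro x hx
    rw [PySem.List.mem_pyRange_one] at hx
    have hx0 : 0 ≤ x := le_trans (Int.natCast_nonneg k) hx.1
    have hxx : x = ((x.toNat : Nat) : Int) := (Int.toNat_of_nonneg hx0).symm
    by_cases hlt : x.toNat < j
    · rw [hxx, hnone x.toNat (by omega) hlt]
      simp
    · have hxj : x.toNat = j := by omega
      rw [hxx, hxj, hjf]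
      simp
  rw [h1]
  simp

lemma pvScanB_hit (L W : List Char) (k j : Nat) (hkj : k ≤ j) (hj : j + W.length ≤ L.length)
    (hnone : ∀ i : Nat, k ≤ i → i < j → pvPredB L W (i : Int) = false)
    (hjt : pvPredB L W (j : Int) = true) :
    pvScanB L W (k : Int) = (j : Int) := by
  unfold pvScanB
  rw [PySem.List.pyRange_one_append (k : Int) (j : Int) (PySem.List.len L - PySem.List.len W + 1)
    (by omega) (by simp only [PySem.List.len_eq]; omega)]
  rw [List.find?_append]
  have h1 : (PySem.List.pyRange (k : Int) (j : Int) 1).find? (pvPredB L W) = none := by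
    rw [List.find?_eq_none]
    intro x hx
    rw [PySem.List.mem_pyRange_one] at hx
    have hx0 : 0 ≤ x := le_trans (Int.natCast_nonneg k) hx.1
    have hxx : x = ((x.toNat : Nat) : Int) := (Int.toNat_of_nonneg hx0).symm
    rw [hxx, hnone x.toNat (by omega) (by omega)]
    simp
  rw [h1]
  rw [PySem.List.pyRange_one_cons (by simp only [PySem.List.len_eq]; omega)]
  rw [List.find?_cons_of_pos hjt]
  simp

lemma findFrom_neg (L W : List Char) (s : Int) (hs : s < 0) :
    PySem.Chars.findFrom L W s none =
      PySem.Chars.findFrom L W (if s + (L.length : Int) < 0 then 0 else s + (L.length : Int)) none := by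
  simp only [PySem.Chars.findFrom]
  split_ifs <;> first | rfl | omega

lemma findFrom_gt (L W : List Char) (s : Int) (h : (L.length : Int) < s) :
    PySem.Chars.findFrom L W s none = -1 := by
  simp only [PySem.Chars.findFrom]
  split_ifs <;> first | rfl | omega

lemma go_eq_scan (L W : List Char) :
    ∀ fuel : Nat, ∀ k : Nat, k ≤ L.length + 1 → L.length + 2 - k ≤ fuel →
      findunescapedGo L W fuel (PySem.Chars.findFrom L W (k : Int) none) = pvScanB L W (k : Int) := by
  intro fuel
  induction fuel with
  | zero => intro k hk hf; omega
  | succ fuel ih =>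
    intro k hk hf
    by_cases hk1 : k = L.length + 1
    · subst hk1
      rw [findFrom_gt L W _ (by push_cast; omega)]
      rw [pvScanB_empty L W _ (by simp only [PySem.List.len_eq]; push_cast; omega)]
      simp [findunescapedGo]
    · have hk' : k ≤ L.length := by omega
      by_cases hjn : PySem.Chars.findFrom L W (k : Int) none = -1
      · rw [hjn]
        have hninf : ¬ W <:+: L.drop k := (PySem.Chars.findFrom_natCast_eq_neg_one_iff L W k hk').mp hjn
        have hall : ∀ i : Nat, k ≤ i → i ≤ L.length → pvPredB L W (i : Int) = false := by
          intro i h1 h2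
          rw [Bool.eq_false_iff]
          intro hpb
          have hpre := pvPredB_prefix hpb
          have hd : L.drop i = (L.drop k).drop (i - k) := by
            rw [List.drop_drop]; congr 1; omega
          rw [hd] at hpre
          exact hninf (hpre.isInfix.trans (List.drop_suffix _ _).isInfix)
        rw [pvScanB_none L W k hall]
        simp [findunescapedGo]
      · obtain ⟨hkj, hpre, hmin⟩ := PySem.Chars.findFrom_natCast_spec L W k hk' hjn
        set j := PySem.Chars.findFrom L W (k : Int) none with hjdef
        have hj0 : 0 ≤ j := le_trans (Int.natCast_nonneg k) hkj
        have hjle : j ≤ (L.length : Int) := by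
          have h := PySem.Chars.findFrom_natCast L W k hk'
          rw [← hjdef] at h
          by_cases hf2 : PySem.Chars.find (L.drop k) W = -1
          · rw [if_pos hf2] at h
            exact absurd h hjn
          · have hle := PySem.Chars.find_le_length (L.drop k) W
            rw [if_neg hf2] at h
            simp only [List.length_drop] at hle
            omega
        set jn := j.toNat with hjndef
        have hjcast : j = ((jn : Nat) : Int) := by omega
        have hkjn : k ≤ jn := by omega
        have hjnlen : jn + W.length ≤ L.length := by
          have := hpre.length_le
          simp only [List.length_drop] at this
          omega
        have hnone : ∀ i : Nat, k ≤ i → i < jn → pvPredB L W (i : Int) = false := by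
          intro i h1 h2
          rw [Bool.eq_false_iff]
          intro hpb
          exact hmin i h1 h2 (pvPredB_prefix hpb)
        by_cases hesc : 0 < jn ∧ L[jn-1]? = some '\\'
        · have hget : PySem.List.pyGet? L (j - 1) = some '\\' := by
            have h1 : j - 1 = ((jn - 1 : Nat) : Int) := by omega
            rw [h1, PySem.List.pyGet?_natCast]
            exact hesc.2
          have hstep : findunescapedGo L W (fuel + 1) j
              = findunescapedGo L W fuel (PySem.Chars.findFrom L W (j + 1) none) := by
            simp only [findunescapedGo]
            rw [if_pos ⟨by omega, hget⟩]
          have hnext : j + 1 = ((jn + 1 : Nat) : Int) := by omega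
          rw [hstep, hnext, ih (jn + 1) (by omega) (by omega)]
          rw [pvScanB_skip L W k jn hkjn hjnlen hnone (pvPredB_false_esc L W jn hesc.1 hesc.2)]
          norm_cast
        · have hstop : findunescapedGo L W (fuel + 1) j = j := by
            simp only [findunescapedGo]
            rw [if_neg]
            rintro ⟨ha, hb⟩
            have h0 : 0 < jn := by omega
            have h1 : j - 1 = ((jn - 1 : Nat) : Int) := by omega
            rw [h1, PySem.List.pyGet?_natCast] at hb
            exact hesc ⟨h0, hb⟩
          have hpj : pvPredB L W (jn : Int) = true := by
            rw [pvPredB_iff]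
            refine ⟨hpre, ?_⟩
            by_cases h0 : jn = 0
            · exact Or.inl h0
            · exact Or.inr (fun hbs => hesc ⟨by omega, hbs⟩)
          rw [hstop, pvScanB_hit L W k jn hkjn hjnlen hnone hpj, hjcast]

-- ===== VERDICT (by name: the statement is the Claim_ definition above) =====
theorem findunescaped_spec : Claim_equal_findunescaped := by
  intro line what start _ hpre
  unfold Pre_findunescaped at hpre
  unfold Spec_findunescaped findunescaped findunescaped_alt
  set L := line.toList with hL
  set W := what.toList with hW
  show findunescapedGo L W (L.length + 2) (PySem.Chars.findFrom L W start none) = pvScanB L W (max start 0)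
  by_cases hneg : start < 0
  · have hle : start + (L.length : Int) ≤ 0 := by
      rcases hpre with h | h
      · omega
      · rw [hL]; exact h
    rw [findFrom_neg L W start hneg]
    have h0 : (if start + (L.length : Int) < 0 then 0 else start + (L.length : Int)) = ((0 : Nat) : Int) := by
      split_ifs <;> simp <;> omega
    have hm0 : max start 0 = ((0 : Nat) : Int) := by simp; omega
    rw [h0, hm0]
    exact go_eq_scan L W (L.length + 2) 0 (by omega) (by omega)
  · have hmax : max start 0 = start := by omega
    rw [hmax]
    by_cases hbig : (L.length : Int) < start
    · rw [findFrom_gt L W start hbig]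
      rw [pvScanB_empty L W start (by simp only [PySem.List.len_eq]; omega)]
      simp [findunescapedGo]
    · have hsn : start = ((start.toNat : Nat) : Int) := by omega
      rw [hsn]
      exact go_eq_scan L W (L.length + 2) start.toNat (by omega) (by omega)
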